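-- pv_equiv track=rewrite | github.com/kshmawj111/programmers | 2018 카카오 블라인드 채용/프렌즈 4블록.py | solution
-- ===== SOURCE A (Python) =====
-- def initialize_board(height, width, board: list):
--     new_board = [[] for _ in range(width)]
--     for x in range(height):
--         for w in range(width):
--             new_board[w].append(board[x][w])
--
--     return new_board
--
-- def mark_delete(board):
--     delete_list = []
--     for r in range(1, len(board)):
--         for c in range(1, len(board[0])):
--             if board[r][c] == board[r-1][c-1] == board[r-1][c] == board[r][c-1] and board[r][c] != 0:
--                 delete_list.append((r, c))
--
--     return delete_list
--
-- def delete_marked(board, delete_list):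
--     num_deleted = 0
--     original_cols = len(board[0])
--     REMOVE_TARGET = -1
--
--     # 지울 인덱스를 -1로 지정
--     for r, c in delete_list:
--         for x in range(-1, 1):
--             for y in range(-1, 1):
--                 board[r+x][c+y] = REMOVE_TARGET
--
--     # 각 행에서 지울 값이 있는지 확인하고 있다면 값을 제거함
--     for row in board:
--         while REMOVE_TARGET in row:
--             row.remove(REMOVE_TARGET)
--             num_deleted += 1
--
--     # 값이 움직인거를 표현하기 위해 앞에 0을 추가함.
--     # transposed 된 보드이기 때문에 앞에다 추가하였음.
--     for row in board:
--         while len(row) < original_cols: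
--             row.insert(0, 0)
--
--     return num_deleted
--
-- def solution(m, n, board):
--     answer = 0
--     board = initialize_board(m, n, board)
--     delete_list = mark_delete(board)
--
--     while delete_list:
--         answer += delete_marked(board, delete_list)
--         delete_list = mark_delete(board)
--
--     return answer
-- ===== SOURCE B (Python) =====
-- def solution(m, n, board):
--     # Row-major grid with a set of marked cells and per-column gravity,
--     # instead of A's transposed board with -1 sentinels, remove() loops
--     # and insert(0, 0) padding.  None is the empty cell.
--     grid = [list(row[:n]) for row in board[:m]]
--     answer = 0
--     while True:
--         marked = set()
--         for i in range(m - 1):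
--             for j in range(n - 1):
--                 v = grid[i][j]
--                 if v is not None and v == grid[i][j + 1] == grid[i + 1][j] == grid[i + 1][j + 1]:
--                     marked.update(((i, j), (i, j + 1), (i + 1, j), (i + 1, j + 1)))
--         if not marked:
--             return answer
--         answer += len(marked)
--         cols = []
--         for j in range(n):
--             kept = [grid[i][j] for i in range(m) if (i, j) not in marked]
--             cols.append([None] * (m - len(kept)) + kept)
--         grid = [[cols[j][i] for j in range(n)] for i in range(m)]
-- ===== Notes on version B (the rewrite author's own statement) =====
-- stated objective: alternative
-- what changed: B keeps the board row-major and each round builds a set of marked cells and applies gravity by rebuilding every column (pad Nones on top of the unmarked survivors), instead of A's transposed list-of-columns board that writes a -1 sentinel into each 2x2 block, strips it with repeated list.remove scans and re-pads with insert(0, 0) loops.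
import Mathlib
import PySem

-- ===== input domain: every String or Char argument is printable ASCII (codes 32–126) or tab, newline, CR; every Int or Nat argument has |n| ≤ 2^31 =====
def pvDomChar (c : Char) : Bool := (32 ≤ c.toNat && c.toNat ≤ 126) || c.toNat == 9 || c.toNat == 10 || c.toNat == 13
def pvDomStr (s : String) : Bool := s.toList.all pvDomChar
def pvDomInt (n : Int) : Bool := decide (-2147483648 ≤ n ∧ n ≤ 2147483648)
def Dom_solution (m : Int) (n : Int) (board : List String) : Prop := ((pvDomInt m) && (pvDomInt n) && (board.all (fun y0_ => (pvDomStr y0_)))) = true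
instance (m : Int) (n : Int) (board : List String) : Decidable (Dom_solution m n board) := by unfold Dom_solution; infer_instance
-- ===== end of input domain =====

-- One honest line: B keeps the board row-major with a marked-cell set and per-column
-- gravity rebuild, instead of A's transposed board with -1 sentinels, remove() loops
-- and insert(0,0) padding; objective: alternative (same asymptotic cost).

-- ===== PORT A =====
-- Board cells of A's transposed board: a character tile, the int 0 padding, or the int -1 removal sentinel.
inductive Cell
  | tile : Char → Cell
  | zero : Cell
  | rem  : Cell
deriving DecidableEq, Repr

-- board[x][w] as a Cell (junk default Cell.zero only outside Pre_)
def charAt (board : List String) (x w : Int) : Cell :=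
  match PySem.List.pyGet? board x with
  | none => Cell.zero
  | some s =>
    match PySem.Str.pyGet? s w with
    | none => Cell.zero
    | some c => Cell.tile c

def initializeBoard (height width : Int) (board : List String) : List (List Cell) :=
  (PySem.List.pyRange 0 height 1).foldl
    (fun nb x =>
      (PySem.List.pyRange 0 width 1).foldl
        (fun nb w =>
          PySem.List.pySetD nb w (PySem.List.pyGetD nb w [] ++ [charAt board x w]))
        nb)
    ((PySem.List.pyRange 0 width 1).map (fun _ => ([] : List Cell)))

def cellAt (b : List (List Cell)) (r c : Int) : Cell :=
  PySem.List.pyGetD (PySem.List.pyGetD b r []) c Cell.zero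

def markDelete (b : List (List Cell)) : List (Int × Int) :=
  (PySem.List.pyRange 1 (b.length : Int) 1).foldl
    (fun dl r =>
      (PySem.List.pyRange 1 ((PySem.List.pyGetD b 0 []).length : Int) 1).foldl
        (fun dl c =>
          if cellAt b r c = cellAt b (r-1) (c-1) ∧ cellAt b (r-1) (c-1) = cellAt b (r-1) c ∧
             cellAt b (r-1) c = cellAt b r (c-1) ∧ cellAt b r c ≠ Cell.zero
          then dl ++ [(r, c)] else dl)
        dl)
    []

def set2 (b : List (List Cell)) (r c : Int) (v : Cell) : List (List Cell) :=
  PySem.List.pySetD b r (PySem.List.pySetD (PySem.List.pyGetD b r []) c v)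

-- while REMOVE_TARGET in row: row.remove(REMOVE_TARGET); num_deleted += 1
def removeLoop (row : List Cell) (k : Int) : List Cell × Int :=
  if h : Cell.rem ∈ row then removeLoop (row.erase Cell.rem) (k + 1)
  else (row, k)
termination_by row.length
decreasing_by
  have h1 : (row.erase Cell.rem).length = row.length - 1 := List.length_erase_of_mem h
  have h2 : 0 < row.length := List.length_pos_of_mem h
  omega

-- while len(row) < original_cols: row.insert(0, 0)
def padLoop (row : List Cell) (orig : Nat) : List Cell :=
  if row.length < orig then padLoop (Cell.zero :: row) orig else row
termination_by orig - row.length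

def deleteMarked (b : List (List Cell)) (dl : List (Int × Int)) : List (List Cell) × Int :=
  let originalCols := (PySem.List.pyGetD b 0 []).length
  let b2 := dl.foldl
    (fun b rc =>
      (PySem.List.pyRange (-1) 1 1).foldl
        (fun b x =>
          (PySem.List.pyRange (-1) 1 1).foldl
            (fun b y => set2 b (rc.1 + x) (rc.2 + y) Cell.rem) b)
        b)
    b
  let res := b2.foldl
    (fun (acc : List (List Cell) × Int) row =>
      let rk := removeLoop row 0
      (acc.1 ++ [rk.1], acc.2 + rk.2))
    ([], 0)
  (res.1.map (fun row => padLoop row originalCols), res.2)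

def solLoop : Nat → List (List Cell) → Int → Int
  | 0, _, ans => ans
  | fuel+1, b, ans =>
    let dl := markDelete b
    if dl = [] then ans
    else
      let r := deleteMarked b dl
      solLoop fuel r.1 (ans + r.2)

def solution (m : Int) (n : Int) (board : List String) : Int :=
  solLoop (m.toNat * n.toNat + 1) (initializeBoard m n board) 0

-- ===== PORT B =====
-- grid = [list(row[:n]) for row in board[:m]]; None is the empty cell
def initGrid (m n : Int) (board : List String) : List (List (Option Char)) :=
  (PySem.List.slice board none (some m)).map
    (fun row => (PySem.List.slice row.toList none (some n)).map some)

def cellB (g : List (List (Option Char))) (i j : Int) : Option Char :=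
  PySem.List.pyGetD (PySem.List.pyGetD g i []) j none

def computeMarks (m n : Int) (g : List (List (Option Char))) : PySem.Set (Int × Int) :=
  (PySem.List.pyRange 0 (m-1) 1).foldl
    (fun s i =>
      (PySem.List.pyRange 0 (n-1) 1).foldl
        (fun s j =>
          if cellB g i j ≠ none ∧ cellB g i j = cellB g i (j+1) ∧
             cellB g i (j+1) = cellB g (i+1) j ∧ cellB g (i+1) j = cellB g (i+1) (j+1)
          then PySem.Set.update s [(i, j), (i, j+1), (i+1, j), (i+1, j+1)]
          else s)
        s)
    PySem.Set.empty

def gravity (m n : Int) (g : List (List (Option Char))) (marked : PySem.Set (Int × Int)) :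
    List (List (Option Char)) :=
  let cols := (PySem.List.pyRange 0 n 1).map
    (fun j =>
      let kept := ((PySem.List.pyRange 0 m 1).filter (fun i => ¬ ((i, j) ∈ marked))).map
        (fun i => cellB g i j)
      List.replicate (m - (kept.length : Int)).toNat (none : Option Char) ++ kept)
  (PySem.List.pyRange 0 m 1).map
    (fun i =>
      (PySem.List.pyRange 0 n 1).map
        (fun j => PySem.List.pyGetD (PySem.List.pyGetD cols j []) i none))

def altLoop (m n : Int) : Nat → List (List (Option Char)) → Int → Int
  | 0, _, ans => ans
  | fuel+1, g, ans =>
    let marked := computeMarks m n g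
    if marked = [] then ans
    else altLoop m n fuel (gravity m n g marked) (ans + (marked.length : Int))

def solution_alt (m : Int) (n : Int) (board : List String) : Int :=
  altLoop m n (m.toNat * n.toNat + 1) (initGrid m n board) 0

-- ===== PRECONDITION & SPEC =====
-- Pre_ excludes exactly the inputs where A raises IndexError: when n > 0 it needs
-- m ≤ len(board) and every one of the first m rows at least n characters long.
def Pre_solution (m : Int) (n : Int) (board : List String) : Prop :=
  0 < n → (m ≤ (board.length : Int) ∧ ∀ s ∈ board.take m.toNat, n ≤ (s.length : Int))
instance (m : Int) (n : Int) (board : List String) : Decidable (Pre_solution m n board) := by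
  unfold Pre_solution; infer_instance

def pvWitness_solution : Int × Int × List String := (2, 2, ["AB", "CD"])

def Spec_solution (m : Int) (n : Int) (board : List String) (out : Int) : Prop := out = solution_alt m n board
instance (m : Int) (n : Int) (board : List String) (out : Int) : Decidable (Spec_solution m n board out) := by unfold Spec_solution; infer_instance

-- ===== CLAIM (what is proved, stated in full; the proofs are below) =====
def Claim_equal_solution : Prop := ∀ (m : Int) (n : Int) (board : List String), Dom_solution m n board → Pre_solution m n board → Spec_solution m n board (solution m n board)

-- ===== LEMMAS AND PROOFS =====

-- conv: B's cell (Option Char) seen as A's cell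
def conv : Option Char → Cell
  | none => Cell.zero
  | some c => Cell.tile c

theorem conv_eq_zero_iff (v : Option Char) : conv v = Cell.zero ↔ v = none := by
  cases v <;> simp [conv]

theorem conv_ne_rem (v : Option Char) : conv v ≠ Cell.rem := by
  cases v <;> simp [conv]

theorem conv_inj (a b : Option Char) : conv a = conv b ↔ a = b := by
  cases a <;> cases b <;> simp [conv]

-- Nat-indexed accessors
def aCell (T : List (List Cell)) (r x : Nat) : Cell := (T.getD r []).getD x Cell.zero
def bCell (G : List (List (Option Char))) (i j : Nat) : Option Char := (G.getD i []).getD j none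

theorem cellAt_natCast (T : List (List Cell)) (r x : Nat) :
    cellAt T (r : Int) (x : Int) = aCell T r x := by
  simp [cellAt, aCell, PySem.List.pyGetD_natCast]

theorem cellB_natCast (G : List (List (Option Char))) (i j : Nat) :
    cellB G (i : Int) (j : Int) = bCell G i j := by
  simp [cellB, bCell, PySem.List.pyGetD_natCast]

-- the simulation relation between A's transposed board and B's row-major grid
def SimRel (m n : Int) (T : List (List Cell)) (G : List (List (Option Char))) : Prop :=
  T.length = n.toNat ∧ G.length = m.toNat ∧
  (∀ row ∈ T, row.length = m.toNat) ∧ (∀ row ∈ G, row.length = n.toNat) ∧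
  (∀ r x : Nat, r < n.toNat → x < m.toNat → aCell T r x = conv (bCell G x r))

-- A's 2x2 test at (r, c) and B's 2x2 test at (i, j)
abbrev matchA (b : List (List Cell)) (r c : Int) : Prop :=
  cellAt b r c = cellAt b (r-1) (c-1) ∧ cellAt b (r-1) (c-1) = cellAt b (r-1) c ∧
  cellAt b (r-1) c = cellAt b r (c-1) ∧ cellAt b r c ≠ Cell.zero

abbrev matchB (g : List (List (Option Char))) (i j : Int) : Prop :=
  cellB g i j ≠ none ∧ cellB g i j = cellB g i (j+1) ∧
  cellB g i (j+1) = cellB g (i+1) j ∧ cellB g (i+1) j = cellB g (i+1) (j+1)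

-- ---- markDelete characterization ----

theorem markDelete_eq (b : List (List Cell)) :
    markDelete b = (PySem.List.pyRange 1 (b.length : Int) 1).flatMap (fun r =>
      ((PySem.List.pyRange 1 ((PySem.List.pyGetD b 0 []).length : Int) 1).filter
          (fun c => decide (matchA b r c))).map (fun c => (r, c))) := by
  unfold markDelete
  have h1 : ∀ (r : Int) (l : List Int) (dl : List (Int × Int)),
      l.foldl (fun dl c =>
          if cellAt b r c = cellAt b (r-1) (c-1) ∧ cellAt b (r-1) (c-1) = cellAt b (r-1) c ∧
             cellAt b (r-1) c = cellAt b r (c-1) ∧ cellAt b r c ≠ Cell.zero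
          then dl ++ [(r, c)] else dl) dl
        = dl ++ (l.filter (fun c => decide (matchA b r c))).map (fun c => (r, c)) := by
    intro r l
    induction l with
    | nil => intro dl; simp
    | cons c t ih =>
      intro dl
      by_cases h : matchA b r c
      · simp only [List.foldl_cons, List.filter_cons, if_pos (show _ from h),
          decide_eq_true (show _ from h)]
        rw [ih]; simp
      · have hd : decide (matchA b r c) = false := decide_eq_false h
        simp only [List.foldl_cons, List.filter_cons, if_neg (show ¬ _ from h), hd]
        rw [ih]; simp
  have h2 : ∀ (l : List Int) (dl : List (Int × Int)),
      l.foldl (fun dl r =>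
        (PySem.List.pyRange 1 ((PySem.List.pyGetD b 0 []).length : Int) 1).foldl
          (fun dl c =>
            if cellAt b r c = cellAt b (r-1) (c-1) ∧ cellAt b (r-1) (c-1) = cellAt b (r-1) c ∧
               cellAt b (r-1) c = cellAt b r (c-1) ∧ cellAt b r c ≠ Cell.zero
            then dl ++ [(r, c)] else dl) dl) dl
      = dl ++ l.flatMap (fun r =>
          ((PySem.List.pyRange 1 ((PySem.List.pyGetD b 0 []).length : Int) 1).filter
            (fun c => decide (matchA b r c))).map (fun c => (r, c))) := by
    intro l
    induction l with
    | nil => intro dl; simp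
    | cons r t ih =>
      intro dl
      simp only [List.foldl_cons, List.flatMap_cons]
      rw [h1, ih, List.append_assoc]
  simpa using h2 (PySem.List.pyRange 1 (b.length : Int) 1) []

theorem mem_markDelete (b : List (List Cell)) (r c : Int) :
    (r, c) ∈ markDelete b ↔
      1 ≤ r ∧ r < (b.length : Int) ∧ 1 ≤ c ∧ c < ((PySem.List.pyGetD b 0 []).length : Int) ∧
      matchA b r c := by
  rw [markDelete_eq]
  simp only [List.mem_flatMap, List.mem_map, List.mem_filter, PySem.List.mem_pyRange_one,
    decide_eq_true_eq, Prod.mk.injEq]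
  constructor
  · rintro ⟨r', ⟨hr1, hr2⟩, c', ⟨⟨hc1, hc2⟩, hm⟩, rfl, rfl⟩
    exact ⟨hr1, hr2, hc1, hc2, hm⟩
  · rintro ⟨hr1, hr2, hc1, hc2, hm⟩
    exact ⟨r, ⟨hr1, hr2⟩, c, ⟨⟨hc1, hc2⟩, hm⟩, rfl, rfl⟩

theorem markDelete_eq_nil_iff (b : List (List Cell)) :
    markDelete b = [] ↔ ∀ r c : Int,
      1 ≤ r → r < (b.length : Int) → 1 ≤ c → c < ((PySem.List.pyGetD b 0 []).length : Int) →
      ¬ matchA b r c := by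
  rw [List.eq_nil_iff_forall_not_mem]
  constructor
  · intro h r c h1 h2 h3 h4 hm
    exact h (r, c) ((mem_markDelete b r c).2 ⟨h1, h2, h3, h4, hm⟩)
  · rintro h ⟨r, c⟩ hmem
    obtain ⟨h1, h2, h3, h4, hm⟩ := (mem_markDelete b r c).1 hmem
    exact h r c h1 h2 h3 h4 hm

-- ---- computeMarks characterization ----

theorem mem_inner_marks (g : List (List (Option Char))) (i : Int) :
    ∀ (l : List Int) (s : PySem.Set (Int × Int)) (q : Int × Int),
      (q ∈ l.foldl (fun s j =>
          if cellB g i j ≠ none ∧ cellB g i j = cellB g i (j+1) ∧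
             cellB g i (j+1) = cellB g (i+1) j ∧ cellB g (i+1) j = cellB g (i+1) (j+1)
          then PySem.Set.update s [(i, j), (i, j+1), (i+1, j), (i+1, j+1)]
          else s) s
      ↔ q ∈ s ∨ ∃ j ∈ l, matchB g i j ∧
          (q = (i, j) ∨ q = (i, j+1) ∨ q = (i+1, j) ∨ q = (i+1, j+1))) := by
  intro l
  induction l with
  | nil => simp
  | cons j t ih =>
    intro s q
    simp only [List.foldl_cons]
    by_cases h : matchB g i j
    · rw [if_pos (show _ from h), ih, PySem.Set.mem_update]
      constructor
      · rintro ((hq | hq) | ⟨j', hj', hm', hq⟩)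
        · exact Or.inl hq
        · refine Or.inr ⟨j, by simp, h, ?_⟩
          simpa using hq
        · exact Or.inr ⟨j', by simp [hj'], hm', hq⟩
      · rintro (hq | ⟨j', hj', hm', hq⟩)
        · exact Or.inl (Or.inl hq)
        · rcases List.mem_cons.1 hj' with rfl | hj'
          · exact Or.inl (Or.inr (by simpa using hq))
          · exact Or.inr ⟨j', hj', hm', hq⟩
    · rw [if_neg (show ¬ _ from h), ih]
      constructor
      · rintro (hq | ⟨j', hj', hm', hq⟩)
        · exact Or.inl hq
        · exact Or.inr ⟨j', by simp [hj'], hm', hq⟩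
      · rintro (hq | ⟨j', hj', hm', hq⟩)
        · exact Or.inl hq
        · rcases List.mem_cons.1 hj' with rfl | hj'
          · exact absurd hm' h
          · exact Or.inr ⟨j', hj', hm', hq⟩

theorem mem_computeMarks (m n : Int) (g : List (List (Option Char))) (q : Int × Int) :
    q ∈ computeMarks m n g ↔ ∃ i j : Int, 0 ≤ i ∧ i < m - 1 ∧ 0 ≤ j ∧ j < n - 1 ∧
      matchB g i j ∧ (q = (i, j) ∨ q = (i, j+1) ∨ q = (i+1, j) ∨ q = (i+1, j+1)) := by
  unfold computeMarks
  have key : ∀ (l : List Int) (s : PySem.Set (Int × Int)),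
      (q ∈ l.foldl (fun s i => (PySem.List.pyRange 0 (n-1) 1).foldl
          (fun s j =>
            if cellB g i j ≠ none ∧ cellB g i j = cellB g i (j+1) ∧
               cellB g i (j+1) = cellB g (i+1) j ∧ cellB g (i+1) j = cellB g (i+1) (j+1)
            then PySem.Set.update s [(i, j), (i, j+1), (i+1, j), (i+1, j+1)]
            else s) s) s
      ↔ q ∈ s ∨ ∃ i ∈ l, ∃ j ∈ PySem.List.pyRange 0 (n-1) 1, matchB g i j ∧
          (q = (i, j) ∨ q = (i, j+1) ∨ q = (i+1, j) ∨ q = (i+1, j+1))) := by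
    intro l
    induction l with
    | nil => simp
    | cons i t ih =>
      intro s
      simp only [List.foldl_cons]
      rw [ih, mem_inner_marks]
      constructor
      · rintro ((hq | ⟨j, hj, h⟩) | ⟨i', hi', h'⟩)
        · exact Or.inl hq
        · exact Or.inr ⟨i, by simp, j, hj, h⟩
        · obtain ⟨j', hj', h''⟩ := h'
          exact Or.inr ⟨i', by simp [hi'], j', hj', h''⟩
      · rintro (hq | ⟨i', hi', j', hj', h'⟩)
        · exact Or.inl (Or.inl hq)
        · rcases List.mem_cons.1 hi' with rfl | hi'
          · exact Or.inl (Or.inr ⟨j', hj', h'⟩)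
          · exact Or.inr ⟨i', hi', j', hj', h'⟩
  rw [key]
  simp only [PySem.List.mem_pyRange_one]
  constructor
  · rintro (hq | ⟨i, ⟨hi0, hi1⟩, j, ⟨hj0, hj1⟩, hm, hq⟩)
    · simp [PySem.Set.empty] at hq
    · exact ⟨i, j, hi0, hi1, hj0, hj1, hm, hq⟩
  · rintro ⟨i, j, hi0, hi1, hj0, hj1, hm, hq⟩
    exact Or.inr ⟨i, ⟨hi0, hi1⟩, j, ⟨hj0, hj1⟩, hm, hq⟩

theorem nodup_computeMarks (m n : Int) (g : List (List (Option Char))) :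
    (computeMarks m n g).Nodup := by
  unfold computeMarks
  have inner : ∀ i (l' : List Int) (s : PySem.Set (Int × Int)), s.Nodup →
      (l'.foldl (fun s j =>
        if cellB g i j ≠ none ∧ cellB g i j = cellB g i (j+1) ∧
           cellB g i (j+1) = cellB g (i+1) j ∧ cellB g (i+1) j = cellB g (i+1) (j+1)
        then PySem.Set.update s [(i, j), (i, j+1), (i+1, j), (i+1, j+1)]
        else s) s).Nodup := by
    intro i l'
    induction l' with
    | nil => intro s hs; simpa using hs
    | cons j t' ih' =>
      intro s hs
      simp only [List.foldl_cons]
      apply ih'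
      split
      · exact PySem.Set.nodup_update _ _ hs
      · exact hs
  have key : ∀ (l : List Int) (s : PySem.Set (Int × Int)), s.Nodup →
      (l.foldl (fun s i => (PySem.List.pyRange 0 (n-1) 1).foldl
          (fun s j =>
            if cellB g i j ≠ none ∧ cellB g i j = cellB g i (j+1) ∧
               cellB g i (j+1) = cellB g (i+1) j ∧ cellB g (i+1) j = cellB g (i+1) (j+1)
            then PySem.Set.update s [(i, j), (i, j+1), (i+1, j), (i+1, j+1)]
            else s) s) s).Nodup := by
    intro l
    induction l with
    | nil => intro s hs; simpa using hs
    | cons i t ih =>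
      intro s hs
      simp only [List.foldl_cons]
      exact ih _ (inner i _ s hs)
  exact key _ _ (by simp [PySem.Set.empty])

-- ---- deleteMarked machinery ----

-- does the 2x2 block anchored (bottom-right) at a cover (r, c)?
abbrev cover (a : Int × Int) (r c : Int) : Prop :=
  (r = a.1 - 1 ∨ r = a.1) ∧ (c = a.2 - 1 ∨ c = a.2)

theorem length_set2 (b : List (List Cell)) (r c : Int) (v : Cell) :
    (set2 b r c v).length = b.length := by
  simp [set2, PySem.List.length_pySetD]

theorem pyGetD_nonneg_eq {α : Type} (bb : List α) {r : Int} (h1 : 0 ≤ r) (d : α) :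
    PySem.List.pyGetD bb r d = bb.getD r.toNat d := by
  obtain ⟨rn, rfl⟩ : ∃ rn : Nat, r = (rn : Int) := ⟨r.toNat, (Int.toNat_of_nonneg h1).symm⟩
  rw [PySem.List.pyGetD_natCast]
  simp

theorem set2_eq_of_nonneg (b : List (List Cell)) {r c : Int} (hr : 0 ≤ r) (hc : 0 ≤ c)
    (v : Cell) :
    set2 b r c v = b.set r.toNat ((b.getD r.toNat []).set c.toNat v) := by
  unfold set2
  rw [PySem.List.pySetD_of_nonneg _ _ hr, PySem.List.pySetD_of_nonneg _ _ hc,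
      pyGetD_nonneg_eq b hr]

theorem getD_mem_of_lt {b : List (List Cell)} {k : Nat} (h : k < b.length) :
    b.getD k [] ∈ b := by
  rw [List.getD_eq_getElem _ _ h]
  exact List.getElem_mem h

theorem rows_set2 {b : List (List Cell)} {M : Nat} (hb : ∀ row ∈ b, row.length = M)
    {r c : Int} (hr : 0 ≤ r) (hrl : r < (b.length : Int)) (hc : 0 ≤ c) (v : Cell) :
    ∀ row ∈ set2 b r c v, row.length = M := by
  intro row hrow
  rw [set2_eq_of_nonneg b hr hc] at hrow
  rcases List.mem_or_eq_of_mem_set hrow with h | h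
  · exact hb _ h
  · subst h
    rw [List.length_set]
    exact hb _ (getD_mem_of_lt (by omega))

theorem cellAt_nonneg_eq (bb : List (List Cell)) {r c : Int} (h1 : 0 ≤ r) (h2 : 0 ≤ c) :
    cellAt bb r c = (bb.getD r.toNat []).getD c.toNat Cell.zero := by
  unfold cellAt
  rw [pyGetD_nonneg_eq bb h1, pyGetD_nonneg_eq _ h2]

theorem getD2_set_set {b : List (List Cell)} {M : Nat} (hb : ∀ row ∈ b, row.length = M)
    {rn cn rn' cn' : Nat} (hrn : rn < b.length) (hcn : cn < M) (hrn' : rn' < b.length)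
    (hcn' : cn' < M) (v : Cell) :
    ((b.set rn ((b.getD rn []).set cn v)).getD rn' []).getD cn' Cell.zero
      = if rn' = rn ∧ cn' = cn then v else (b.getD rn' []).getD cn' Cell.zero := by
  have hrowlen : (b.getD rn []).length = M := hb _ (getD_mem_of_lt hrn)
  have hrowlen' : (b.getD rn' []).length = M := hb _ (getD_mem_of_lt hrn')
  have houter : (b.set rn ((b.getD rn []).set cn v)).getD rn' []
      = if rn' = rn then (b.getD rn []).set cn v else b.getD rn' [] := by
    have hlen : rn' < (b.set rn ((b.getD rn []).set cn v)).length := by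
      rw [List.length_set]; exact hrn'
    rw [List.getD_eq_getElem _ [] hlen]
    by_cases hreq : rn' = rn
    · subst hreq
      rw [List.getElem_set_self, if_pos rfl]
    · rw [List.getElem_set_ne (fun h => hreq h.symm), if_neg hreq,
          List.getD_eq_getElem _ _ hrn']
  rw [houter]
  by_cases hreq : rn' = rn
  · rw [if_pos hreq]
    have hlen2 : cn' < ((b.getD rn []).set cn v).length := by rw [List.length_set]; omega
    rw [List.getD_eq_getElem _ Cell.zero hlen2]
    by_cases hceq : cn' = cn
    · subst hceq
      rw [List.getElem_set_self, if_pos ⟨hreq, rfl⟩]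
    · rw [List.getElem_set_ne (fun h => hceq h.symm), if_neg (by tauto), hreq]
      exact (List.getD_eq_getElem _ _ (by omega)).symm
  · rw [if_neg hreq, if_neg (fun hh => hreq hh.1)]

theorem cellAt_set2 {b : List (List Cell)} {M : Nat} (hb : ∀ row ∈ b, row.length = M)
    {r c r' c' : Int} (hr : 0 ≤ r) (hrl : r < (b.length : Int)) (hc : 0 ≤ c)
    (hcl : c < (M : Int)) (hr' : 0 ≤ r') (hrl' : r' < (b.length : Int)) (hc' : 0 ≤ c')
    (hcl' : c' < (M : Int)) (v : Cell) :
    cellAt (set2 b r c v) r' c' = if r' = r ∧ c' = c then v else cellAt b r' c' := by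
  rw [set2_eq_of_nonneg b hr hc, cellAt_nonneg_eq _ hr' hc', cellAt_nonneg_eq b hr' hc']
  rw [getD2_set_set hb (by omega) (by omega) (by omega) (by omega) v]
  by_cases h : r' = r ∧ c' = c
  · rw [if_pos h, if_pos (by omega)]
  · rw [if_neg h, if_neg (by omega)]

theorem upd4_cellAt {b : List (List Cell)} {M : Nat} (hb : ∀ row ∈ b, row.length = M)
    {a : Int × Int} (ha : 1 ≤ a.1 ∧ a.1 < (b.length : Int) ∧ 1 ≤ a.2 ∧ a.2 < (M : Int))
    {r' c' : Int} (hr' : 0 ≤ r') (hrl' : r' < (b.length : Int)) (hc' : 0 ≤ c')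
    (hcl' : c' < (M : Int)) :
    cellAt ((PySem.List.pyRange (-1) 1 1).foldl
        (fun b x => (PySem.List.pyRange (-1) 1 1).foldl
          (fun b y => set2 b (a.1 + x) (a.2 + y) Cell.rem) b) b) r' c'
      = if cover a r' c' then Cell.rem else cellAt b r' c' := by
  have hrange : PySem.List.pyRange (-1) 1 1 = [-1, 0] := by decide
  obtain ⟨h1, h2, h3, h4⟩ := ha
  rw [hrange]
  simp only [List.foldl_cons, List.foldl_nil]
  have l1 := length_set2 b (a.1 + -1) (a.2 + -1) Cell.rem
  have d1 := rows_set2 hb (r := a.1 + -1) (c := a.2 + -1) (by omega) (by omega) (by omega) Cell.rem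
  have l2 := length_set2 (set2 b (a.1 + -1) (a.2 + -1) Cell.rem) (a.1 + -1) (a.2 + 0) Cell.rem
  have d2 := rows_set2 d1 (r := a.1 + -1) (c := a.2 + 0) (by omega) (by omega) (by omega) Cell.rem
  have l3 := length_set2 (set2 (set2 b (a.1 + -1) (a.2 + -1) Cell.rem) (a.1 + -1) (a.2 + 0) Cell.rem) (a.1 + 0) (a.2 + -1) Cell.rem
  have d3 := rows_set2 d2 (r := a.1 + 0) (c := a.2 + -1) (by omega) (by omega) (by omega) Cell.rem
  rw [cellAt_set2 d3 (by omega) (by omega) (by omega) (by omega) hr' (by omega) hc' (by omega)]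
  rw [cellAt_set2 d2 (by omega) (by omega) (by omega) (by omega) hr' (by omega) hc' (by omega)]
  rw [cellAt_set2 d1 (by omega) (by omega) (by omega) (by omega) hr' (by omega) hc' (by omega)]
  rw [cellAt_set2 hb (by omega) (by omega) (by omega) (by omega) hr' (by omega) hc' (by omega)]
  unfold cover
  split_ifs <;> first | rfl | omega

theorem upd4_dims {b : List (List Cell)} {M : Nat} (hb : ∀ row ∈ b, row.length = M)
    {a : Int × Int} (ha : 1 ≤ a.1 ∧ a.1 < (b.length : Int) ∧ 1 ≤ a.2 ∧ a.2 < (M : Int)) :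
    ((PySem.List.pyRange (-1) 1 1).foldl
        (fun b x => (PySem.List.pyRange (-1) 1 1).foldl
          (fun b y => set2 b (a.1 + x) (a.2 + y) Cell.rem) b) b).length = b.length ∧
    (∀ row ∈ (PySem.List.pyRange (-1) 1 1).foldl
        (fun b x => (PySem.List.pyRange (-1) 1 1).foldl
          (fun b y => set2 b (a.1 + x) (a.2 + y) Cell.rem) b) b, row.length = M) := by
  have hrange : PySem.List.pyRange (-1) 1 1 = [-1, 0] := by decide
  obtain ⟨h1, h2, h3, h4⟩ := ha
  rw [hrange]
  simp only [List.foldl_cons, List.foldl_nil]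
  refine ⟨by simp [length_set2], ?_⟩
  have l1 := length_set2 b (a.1 + -1) (a.2 + -1) Cell.rem
  have d1 := rows_set2 hb (r := a.1 + -1) (c := a.2 + -1) (by omega) (by omega) (by omega) Cell.rem
  have l2 := length_set2 (set2 b (a.1 + -1) (a.2 + -1) Cell.rem) (a.1 + -1) (a.2 + 0) Cell.rem
  have d2 := rows_set2 d1 (r := a.1 + -1) (c := a.2 + 0) (by omega) (by omega) (by omega) Cell.rem
  have l3 := length_set2 (set2 (set2 b (a.1 + -1) (a.2 + -1) Cell.rem) (a.1 + -1) (a.2 + 0) Cell.rem) (a.1 + 0) (a.2 + -1) Cell.rem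
  have d3 := rows_set2 d2 (r := a.1 + 0) (c := a.2 + -1) (by omega) (by omega) (by omega) Cell.rem
  exact rows_set2 d3 (r := a.1 + 0) (c := a.2 + 0) (by omega) (by omega) (by omega) Cell.rem

theorem foldl_upd4_cellAt {M : Nat} :
    ∀ (dl : List (Int × Int)) (b : List (List Cell)), (∀ row ∈ b, row.length = M) →
    (∀ a ∈ dl, 1 ≤ a.1 ∧ a.1 < (b.length : Int) ∧ 1 ≤ a.2 ∧ a.2 < (M : Int)) →
    ∀ {r' c' : Int}, 0 ≤ r' → r' < (b.length : Int) → 0 ≤ c' → c' < (M : Int) →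
    cellAt (dl.foldl (fun b rc => (PySem.List.pyRange (-1) 1 1).foldl
        (fun b x => (PySem.List.pyRange (-1) 1 1).foldl
          (fun b y => set2 b (rc.1 + x) (rc.2 + y) Cell.rem) b) b) b) r' c'
      = if ∃ a ∈ dl, cover a r' c' then Cell.rem else cellAt b r' c' := by
  intro dl
  induction dl with
  | nil => intro b hb hdl r' c' h1 h2 h3 h4; simp
  | cons a t ih =>
    intro b hb hdl r' c' h1 h2 h3 h4
    simp only [List.foldl_cons]
    obtain ⟨hl, hr⟩ := upd4_dims hb (hdl a (by simp))
    have hdl' : ∀ a' ∈ t, 1 ≤ a'.1 ∧ a'.1 < (((PySem.List.pyRange (-1) 1 1).foldl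
        (fun b x => (PySem.List.pyRange (-1) 1 1).foldl
          (fun b y => set2 b (a.1 + x) (a.2 + y) Cell.rem) b) b).length : Int) ∧
        1 ≤ a'.2 ∧ a'.2 < (M : Int) := by
      intro a' ha'
      have := hdl a' (by simp [ha'])
      rw [hl]; exact this
    rw [ih _ hr hdl' h1 (by rw [hl]; exact h2) h3 h4]
    rw [upd4_cellAt hb (hdl a (by simp)) h1 h2 h3 h4]
    by_cases hex : ∃ a' ∈ t, cover a' r' c' <;> by_cases hc : cover a r' c' <;>
      simp [hex, hc]

theorem foldl_upd4_dims {M : Nat} :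
    ∀ (dl : List (Int × Int)) (b : List (List Cell)), (∀ row ∈ b, row.length = M) →
    (∀ a ∈ dl, 1 ≤ a.1 ∧ a.1 < (b.length : Int) ∧ 1 ≤ a.2 ∧ a.2 < (M : Int)) →
    (dl.foldl (fun b rc => (PySem.List.pyRange (-1) 1 1).foldl
        (fun b x => (PySem.List.pyRange (-1) 1 1).foldl
          (fun b y => set2 b (rc.1 + x) (rc.2 + y) Cell.rem) b) b) b).length = b.length ∧
    (∀ row ∈ dl.foldl (fun b rc => (PySem.List.pyRange (-1) 1 1).foldl
        (fun b x => (PySem.List.pyRange (-1) 1 1).foldl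
          (fun b y => set2 b (rc.1 + x) (rc.2 + y) Cell.rem) b) b) b, row.length = M) := by
  intro dl
  induction dl with
  | nil => intro b hb _; exact ⟨rfl, hb⟩
  | cons a t ih =>
    intro b hb hdl
    simp only [List.foldl_cons]
    obtain ⟨hl, hr⟩ := upd4_dims hb (hdl a (by simp))
    obtain ⟨hl', hr'⟩ := ih _ hr (by intro a' ha'; have := hdl a' (by simp [ha']); rw [hl]; exact this)
    exact ⟨by rw [hl', hl], hr'⟩

-- while REMOVE_TARGET in row: remove + count  =  filter + count
theorem removeLoop_spec : ∀ (row : List Cell) (k : Int),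
    removeLoop row k = (row.filter (· ≠ Cell.rem), k + (row.count Cell.rem : Int)) := by
  intro row
  induction hn : row.length using Nat.strong_induction_on generalizing row with
  | _ len ih =>
    intro k
    rw [removeLoop]
    by_cases h : Cell.rem ∈ row
    · simp only [dif_pos h]
      obtain ⟨l₁, l₂, hni, hrow, herase⟩ := List.exists_erase_eq h
      rw [herase]
      have hlt : (l₁ ++ l₂).length < len := by subst hrow; simp at hn ⊢; omega
      rw [ih _ hlt _ rfl]
      subst hrow
      have hcnt1 : l₁.count Cell.rem = 0 := List.count_eq_zero.2 hni
      simp only [Prod.mk.injEq]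
      constructor
      · simp [List.filter_append]
      · simp [List.count_append, hcnt1]
        ring
    · simp only [dif_neg h]
      have hf : row.filter (fun x => !decide (x = Cell.rem)) = row :=
        List.filter_eq_self.2 (by intro a ha; simp; rintro rfl; exact h ha)
      have hcnt : row.count Cell.rem = 0 := List.count_eq_zero.2 h
      simp [hcnt, hf]

-- while len(row) < orig: row.insert(0, 0)  =  pad with zeros in front
theorem padLoop_spec : ∀ (row : List Cell) (orig : Nat),
    padLoop row orig = List.replicate (orig - row.length) Cell.zero ++ row := by
  intro row orig
  induction hd : orig - row.length generalizing row with
  | zero =>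
    rw [padLoop, if_neg (by omega)]
    simp
  | succ d ihd =>
    rw [padLoop, if_pos (by omega)]
    rw [ihd _ (by simp; omega), List.replicate_succ']
    simp

-- the per-row fold in deleteMarked
theorem rowsFold_spec : ∀ (l : List (List Cell)) (acc : List (List Cell) × Int),
    l.foldl (fun (acc : List (List Cell) × Int) row =>
        (acc.1 ++ [(removeLoop row 0).1], acc.2 + (removeLoop row 0).2)) acc
      = (acc.1 ++ l.map (fun row => row.filter (· ≠ Cell.rem)),
         acc.2 + (l.map (fun row => (row.count Cell.rem : Int))).sum) := by
  intro l
  induction l with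
  | nil => intro acc; simp
  | cons row t ih =>
    intro acc
    simp only [List.foldl_cons, List.map_cons, List.sum_cons]
    rw [ih]
    rw [removeLoop_spec]
    simp [add_assoc]

theorem deleteMarked_eq (b : List (List Cell)) (dl : List (Int × Int)) :
    deleteMarked b dl =
      (((dl.foldl (fun b rc => (PySem.List.pyRange (-1) 1 1).foldl
          (fun b x => (PySem.List.pyRange (-1) 1 1).foldl
            (fun b y => set2 b (rc.1 + x) (rc.2 + y) Cell.rem) b) b) b).map
          (fun row => row.filter (· ≠ Cell.rem))).map
            (fun row => padLoop row (PySem.List.pyGetD b 0 []).length),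
       ((dl.foldl (fun b rc => (PySem.List.pyRange (-1) 1 1).foldl
          (fun b x => (PySem.List.pyRange (-1) 1 1).foldl
            (fun b y => set2 b (rc.1 + x) (rc.2 + y) Cell.rem) b) b) b).map
          (fun row => (row.count Cell.rem : Int))).sum) := by
  simp only [deleteMarked]
  rw [rowsFold_spec]
  simp

-- ---- small helpers ----

theorem list_eq_map_range {α : Type} (l : List α) (d : α) :
    l = (List.range l.length).map (fun i => l.getD i d) := by
  apply List.ext_getElem (by simp)
  intro i h1 h2
  simp only [List.getElem_map, List.getElem_range]
  rw [List.getD_eq_getElem _ _ h1]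

theorem getD_map_range {α : Type} (f : Nat → α) {M x : Nat} (hx : x < M) (d : α) :
    ((List.range M).map f).getD x d = f x := by
  rw [List.getD_eq_getElem _ _ (by simpa using hx)]
  simp

theorem pyRange_zero_map (k : Int) :
    PySem.List.pyRange 0 k 1 = (List.range k.toNat).map (fun (i : Nat) => (i : Int)) := by
  rw [PySem.List.pyRange_one]
  simp only [zero_add, sub_zero]

theorem listSum_cast {α : Type} (l : List α) (g : α → Nat) :
    (l.map (fun a => ((g a : Nat) : Int))).sum = (((l.map g).sum : Nat) : Int) := by
  induction l with
  | nil => simp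
  | cons a t ih => simp [ih]

theorem conv_getD_pad (l : List (Option Char)) (p x : Nat) :
    (List.replicate p Cell.zero ++ l.map conv).getD x Cell.zero
      = conv ((List.replicate p none ++ l).getD x none) := by
  by_cases h1 : x < p
  · rw [List.getD_append _ _ _ _ (by simpa using h1), List.getD_append _ _ _ _ (by simpa using h1)]
    rw [List.getD_replicate _ h1, List.getD_replicate _ h1]
    rfl
  · rw [List.getD_append_right _ _ _ _ (by simpa using h1),
        List.getD_append_right _ _ _ _ (by simpa using h1)]
    simp only [List.length_replicate]
    by_cases h2 : x - p < l.length
    · rw [List.getD_eq_getElem _ _ (by simpa using h2), List.getD_eq_getElem _ _ h2]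
      simp
    · rw [List.getD_eq_default _ _ (by simpa using h2), List.getD_eq_default _ _ (by omega)]
      rfl

-- ---- the match bridge ----

theorem width_eq {m n : Int} {T : List (List Cell)} {G : List (List (Option Char))}
    (hrel : SimRel m n T G) (hN : 0 < n.toNat) :
    (PySem.List.pyGetD T 0 []).length = m.toNat := by
  obtain ⟨hTn, _, hTrow, _, _⟩ := hrel
  have h0 : (0 : Int) ≤ 0 := le_refl 0
  rw [pyGetD_nonneg_eq T h0]
  exact hTrow _ (getD_mem_of_lt (by omega))

theorem match_bridge {m n : Int} {T : List (List Cell)} {G : List (List (Option Char))}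
    (hrel : SimRel m n T G) {r x : Nat} (hr0 : 0 < r) (hr : r < n.toNat) (hx0 : 0 < x)
    (hx : x < m.toNat) :
    matchA T (r : Int) (x : Int) ↔ matchB G ((x : Int) - 1) ((r : Int) - 1) := by
  obtain ⟨hTn, hGm, hTrow, hGrow, hpt⟩ := hrel
  have e1 : ((r : Int) - 1) = ((r - 1 : Nat) : Int) := by omega
  have e2 : ((x : Int) - 1) = ((x - 1 : Nat) : Int) := by omega
  have e3 : ((x - 1 : Nat) : Int) + 1 = ((x : Nat) : Int) := by omega
  have e4 : ((r - 1 : Nat) : Int) + 1 = ((r : Nat) : Int) := by omega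
  unfold matchA matchB
  rw [e1, e2, e3, e4]
  rw [cellAt_natCast, cellAt_natCast, cellAt_natCast, cellAt_natCast,
      cellB_natCast, cellB_natCast, cellB_natCast, cellB_natCast]
  rw [hpt r x hr hx, hpt (r-1) (x-1) (by omega) (by omega), hpt (r-1) x (by omega) hx,
      hpt r (x-1) hr (by omega)]
  rw [conv_inj, conv_inj, conv_inj]
  rw [show (conv (bCell G x r) ≠ Cell.zero) ↔ (bCell G x r ≠ none) from
    not_congr (conv_eq_zero_iff _)]
  constructor
  · rintro ⟨h1, h2, h3, h4⟩
    refine ⟨?_, ?_, ?_, ?_⟩ <;> simp_all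
  · rintro ⟨h1, h2, h3, h4⟩
    refine ⟨?_, ?_, ?_, ?_⟩ <;> simp_all

-- ---- the cover bridge: A's -1-stamped cells are exactly B's marked cells ----

theorem cover_bridge {m n : Int} {T : List (List Cell)} {G : List (List (Option Char))}
    (hrel : SimRel m n T G) (hn : 0 < n) {r x : Nat} (hr : r < n.toNat) (hx : x < m.toNat) :
    (∃ a ∈ markDelete T, cover a (r : Int) (x : Int))
      ↔ ((x : Int), (r : Int)) ∈ computeMarks m n G := by
  have hTn := hrel.1
  have hW : (PySem.List.pyGetD T 0 []).length = m.toNat := width_eq hrel (by omega)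
  constructor
  · rintro ⟨⟨a1, a2⟩, hmem, hcov⟩
    obtain ⟨h1, h2, h3, h4, hma⟩ := (mem_markDelete T a1 a2).1 hmem
    rw [hTn] at h2
    rw [hW] at h4
    obtain ⟨hcr, hcx⟩ := hcov
    have hr0 : a1 = ((a1.toNat : Nat) : Int) := by omega
    have hx0 : a2 = ((a2.toNat : Nat) : Int) := by omega
    rw [hr0, hx0] at hma
    have hmb := (match_bridge hrel (r := a1.toNat) (x := a2.toNat) (by omega) (by omega)
      (by omega) (by omega)).1 hma
    rw [mem_computeMarks]
    refine ⟨a2 - 1, a1 - 1, by omega, by omega, by omega, by omega, ?_, ?_⟩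
    · have ex : ((a2.toNat : Nat) : Int) - 1 = a2 - 1 := by omega
      have er : ((a1.toNat : Nat) : Int) - 1 = a1 - 1 := by omega
      rw [ex, er] at hmb
      exact hmb
    · simp only [Prod.mk.injEq]
      rcases hcx with h | h <;> rcases hcr with h' | h' <;> omega
  · intro hmem
    obtain ⟨i, j, hi0, hi1, hj0, hj1, hmb, hq⟩ := (mem_computeMarks m n G _).1 hmem
    refine ⟨(j + 1, i + 1), ?_, ?_⟩
    · rw [mem_markDelete, hTn, hW]
      refine ⟨by omega, by omega, by omega, by omega, ?_⟩
      have er : (j + 1) = (((j + 1).toNat : Nat) : Int) := by omega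
      have ex : (i + 1) = (((i + 1).toNat : Nat) : Int) := by omega
      rw [er, ex]
      apply (match_bridge hrel (r := (j+1).toNat) (x := (i+1).toNat) (by omega) (by omega)
        (by omega) (by omega)).2
      have e1 : (((i + 1).toNat : Nat) : Int) - 1 = i := by omega
      have e2 : (((j + 1).toNat : Nat) : Int) - 1 = j := by omega
      rw [e1, e2]
      exact hmb
    · unfold cover
      simp only [Prod.mk.injEq] at hq
      rcases hq with ⟨hx', hr'⟩ | ⟨hx', hr'⟩ | ⟨hx', hr'⟩ | ⟨hx', hr'⟩ <;>
        constructor <;> simp <;> omega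

theorem marks_bounds {m n : Int} (g : List (List (Option Char))) (q : Int × Int)
    (h : q ∈ computeMarks m n g) : 0 ≤ q.1 ∧ q.1 < m ∧ 0 ≤ q.2 ∧ q.2 < n := by
  obtain ⟨i, j, hi0, hi1, hj0, hj1, _, hq⟩ := (mem_computeMarks m n g q).1 h
  rcases hq with rfl | rfl | rfl | rfl <;> simp <;> omega

-- the two rounds stop together
theorem dl_nil_iff {m n : Int} {T : List (List Cell)} {G : List (List (Option Char))}
    (hrel : SimRel m n T G) :
    markDelete T = [] ↔ computeMarks m n G = [] := by
  have hTn := hrel.1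
  constructor
  · intro hnil
    rw [List.eq_nil_iff_forall_not_mem]
    rintro ⟨qi, qj⟩ hq
    obtain ⟨i, j, hi0, hi1, hj0, hj1, hmb, _⟩ := (mem_computeMarks m n G _).1 hq
    have hn : 0 < n := by omega
    have hW : (PySem.List.pyGetD T 0 []).length = m.toNat := width_eq hrel (by omega)
    have hma := (match_bridge hrel (r := (j+1).toNat) (x := (i+1).toNat) (by omega) (by omega)
      (by omega) (by omega)).2 (by
        have e1 : (((i + 1).toNat : Nat) : Int) - 1 = i := by omega
        have e2 : (((j + 1).toNat : Nat) : Int) - 1 = j := by omega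
        rw [e1, e2]
        exact hmb)
    have := (markDelete_eq_nil_iff T).1 hnil (((j+1).toNat : Nat) : Int) (((i+1).toNat : Nat) : Int)
      (by omega) (by rw [hTn]; omega) (by omega) (by rw [hW]; omega)
    exact this hma
  · intro hnil
    rw [List.eq_nil_iff_forall_not_mem]
    rintro ⟨a1, a2⟩ hq
    obtain ⟨h1, h2, h3, h4, hma⟩ := (mem_markDelete T a1 a2).1 hq
    rw [hTn] at h2
    have hn : 0 < n := by omega
    have hW : (PySem.List.pyGetD T 0 []).length = m.toNat := width_eq hrel (by omega)
    rw [hW] at h4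
    have hr0 : a1 = ((a1.toNat : Nat) : Int) := by omega
    have hx0 : a2 = ((a2.toNat : Nat) : Int) := by omega
    rw [hr0, hx0] at hma
    have hmb := (match_bridge hrel (r := a1.toNat) (x := a2.toNat) (by omega) (by omega)
      (by omega) (by omega)).1 hma
    have : ((a2 - 1, a1 - 1) : Int × Int) ∈ computeMarks m n G := by
      rw [mem_computeMarks]
      refine ⟨a2 - 1, a1 - 1, by omega, by omega, by omega, by omega, ?_, by tauto⟩
      have ex : ((a2.toNat : Nat) : Int) - 1 = a2 - 1 := by omega
      have er : ((a1.toNat : Nat) : Int) - 1 = a1 - 1 := by omega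
      rw [ex, er] at hmb
      exact hmb
    rw [hnil] at this
    simp at this

-- ---- counting: |marked| as a sum of per-column counts ----

theorem marks_count {N M : Nat} (mk : List (Int × Int)) (hnd : mk.Nodup)
    (hbd : ∀ q ∈ mk, 0 ≤ q.1 ∧ q.1 < (M : Int) ∧ 0 ≤ q.2 ∧ q.2 < (N : Int)) :
    mk.length = ((List.range N).map (fun (r : Nat) =>
      (List.range M).countP (fun (x : Nat) => decide (((x : Int), (r : Int)) ∈ mk)))).sum := by
  classical
  set L := (List.range N).flatMap (fun (r : Nat) =>
    ((List.range M).filter (fun (x : Nat) => decide (((x : Int), (r : Int)) ∈ mk))).map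
      (fun (x : Nat) => (((x : Int), (r : Int)) : Int × Int))) with hL
  have hLnodup : L.Nodup := by
    rw [hL, List.flatMap_def, List.nodup_flatten]
    constructor
    · intro l hl
      obtain ⟨r, _, rfl⟩ := List.mem_map.1 hl
      apply List.Nodup.map
      · intro a b hab
        simpa using hab
      · exact (List.nodup_range).filter _
    · rw [List.pairwise_map]
      apply List.Pairwise.imp (R := (· < ·)) ?_ List.pairwise_lt_range
      intro r r' hlt q hq hq'
      obtain ⟨x, _, rfl⟩ := List.mem_map.1 hq
      obtain ⟨x', _, hx'⟩ := List.mem_map.1 hq'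
      have : ((r : Int)) = ((r' : Int)) := by
        have := congrArg Prod.snd hx'
        simpa using this.symm
      omega
  have hmemL : ∀ q, q ∈ L ↔ q ∈ mk := by
    intro q
    rw [hL]
    simp only [List.mem_flatMap, List.mem_map, List.mem_filter, List.mem_range,
      decide_eq_true_eq]
    constructor
    · rintro ⟨r, hr, x, ⟨⟨hx, hqm⟩, rfl⟩⟩
      exact hqm
    · intro hq
      obtain ⟨hb1, hb2, hb3, hb4⟩ := hbd q hq
      refine ⟨q.2.toNat, by omega, q.1.toNat, ⟨⟨by omega, ?_⟩, ?_⟩⟩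
      · have : (((q.1.toNat : Nat) : Int), ((q.2.toNat : Nat) : Int)) = q := by
          rw [show q = (q.1, q.2) from rfl]
          simp only [Prod.mk.injEq]
          constructor <;> omega
        rw [this]
        exact hq
      · rw [show q = (q.1, q.2) from rfl]
        simp only [Prod.mk.injEq]
        constructor <;> omega
  have hperm : L.Perm mk := (List.perm_ext_iff_of_nodup hLnodup hnd).2 hmemL
  rw [← hperm.length_eq, hL, List.length_flatMap]
  congr 1
  apply List.map_congr_left
  intro r _
  rw [List.length_map, ← List.countP_eq_length_filter]

theorem filter_not_length_add {α : Type} (l : List α) (p : α → Bool) :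
    (l.filter (fun a => !p a)).length + l.countP p = l.length := by
  induction l with
  | nil => simp
  | cons a t ih =>
    by_cases h : p a <;> simp [List.filter_cons, h] <;> omega

-- ---- one round: A's delete/pad step matches B's gravity step, with equal counts ----

theorem step_sim {m n : Int} {T : List (List Cell)} {G : List (List (Option Char))}
    (hm : 0 < m) (hn : 0 < n) (hrel : SimRel m n T G) :
    SimRel m n (deleteMarked T (markDelete T)).1 (gravity m n G (computeMarks m n G)) ∧
    (deleteMarked T (markDelete T)).2 = ((computeMarks m n G).length : Int) := by
  classical
  obtain ⟨hTn, hGm, hTrow, hGrow, hpt⟩ := hrel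
  have hrel' : SimRel m n T G := ⟨hTn, hGm, hTrow, hGrow, hpt⟩
  set M := m.toNat with hM
  set N := n.toNat with hN
  set mk := computeMarks m n G with hmk
  set dl := markDelete T with hdl
  have hW : (PySem.List.pyGetD T 0 []).length = M := width_eq hrel' (by omega)
  have hdlb : ∀ a ∈ dl, 1 ≤ a.1 ∧ a.1 < (T.length : Int) ∧ 1 ≤ a.2 ∧ a.2 < (M : Int) := by
    intro a ha
    obtain ⟨h1, h2, h3, h4, _⟩ := (mem_markDelete T a.1 a.2).1 (by simpa using ha)
    rw [hW] at h4
    exact ⟨h1, h2, h3, h4⟩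
  set b2 := dl.foldl (fun b rc => (PySem.List.pyRange (-1) 1 1).foldl
      (fun b x => (PySem.List.pyRange (-1) 1 1).foldl
        (fun b y => set2 b (rc.1 + x) (rc.2 + y) Cell.rem) b) b) T with hb2
  obtain ⟨hb2len, hb2rows⟩ := foldl_upd4_dims dl T hTrow hdlb
  rw [← hb2] at hb2len hb2rows
  rw [hTn] at hb2len
  have hb2cell : ∀ (r x : Nat), r < N → x < M →
      aCell b2 r x = if ((x : Int), (r : Int)) ∈ mk then Cell.rem else aCell T r x := by
    intro r x hr hx
    have h1 := foldl_upd4_cellAt dl T hTrow hdlb (r' := (r : Int)) (c' := (x : Int))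
      (by omega) (by rw [hTn]; omega) (by omega) (by omega)
    rw [cellAt_natCast, cellAt_natCast] at h1
    rw [← hb2] at h1
    rw [h1, if_congr (cover_bridge hrel' hn hr hx) rfl rfl]
  -- rows of the stamped board
  have hb2rowEq : ∀ r : Nat, r < N → b2.getD r [] = (List.range M).map
      (fun (x : Nat) => if ((x : Int), (r : Int)) ∈ mk then Cell.rem else aCell T r x) := by
    intro r hr
    apply List.ext_getElem
    · rw [hb2rows _ (getD_mem_of_lt (by omega)), List.length_map, List.length_range]
    · intro x h1 h2
      have hx : x < M := by
        rw [hb2rows _ (getD_mem_of_lt (by omega))] at h1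
        exact h1
      simp only [List.getElem_map, List.getElem_range]
      rw [← List.getD_eq_getElem _ Cell.zero h1]
      exact hb2cell r x hr hx
  -- per-column data
  set K : Nat → Nat := fun r => (List.range M).countP
    (fun (x : Nat) => decide (((x : Int), (r : Int)) ∈ mk)) with hK
  set F : Nat → List Cell := fun r => ((List.range M).filter
      (fun (x : Nat) => !decide (((x : Int), (r : Int)) ∈ mk))).map
        (fun x => aCell T r x) with hF
  set kept : Nat → List (Option Char) := fun r => ((List.range M).filter
      (fun (x : Nat) => !decide (((x : Int), (r : Int)) ∈ mk))).map
        (fun x => bCell G x r) with hkept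
  have hKle : ∀ r, K r ≤ M := by
    intro r
    calc K r ≤ (List.range M).length := List.countP_le_length
    _ = M := List.length_range ..
  have hFlen : ∀ r, (F r).length = M - K r := by
    intro r
    rw [hF, List.length_map]
    have h := filter_not_length_add (List.range M)
      (fun (x : Nat) => decide (((x : Int), (r : Int)) ∈ mk))
    simp only [List.length_range] at h
    simp only [hK]
    omega
  have hkeptlen : ∀ r, (kept r).length = M - K r := by
    intro r
    rw [hkept, List.length_map]
    have h := filter_not_length_add (List.range M)
      (fun (x : Nat) => decide (((x : Int), (r : Int)) ∈ mk))
    simp only [List.length_range] at h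
    simp only [hK]
    omega
  have hkeptconv : ∀ r : Nat, r < N → F r = (kept r).map conv := by
    intro r hr
    rw [hF, hkept, List.map_map]
    apply List.map_congr_left
    intro x hx
    have hx' : x < M := by simpa using (List.mem_filter.1 hx).1
    exact hpt r x hr hx'
  have hfilter : ∀ r : Nat, r < N → (b2.getD r []).filter (· ≠ Cell.rem) = F r := by
    intro r hr
    rw [hb2rowEq r hr, List.filter_map]
    have hpred : ∀ x ∈ List.range M,
        ((fun y => decide (y ≠ Cell.rem)) ∘
          (fun (x : Nat) => if ((x : Int), (r : Int)) ∈ mk then Cell.rem else aCell T r x)) x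
        = !decide (((x : Int), (r : Int)) ∈ mk) := by
      intro x hx
      have hx' : x < M := by simpa using hx
      by_cases h : ((x : Int), (r : Int)) ∈ mk
      · simp [h]
      · have : aCell T r x ≠ Cell.rem := by
          rw [hpt r x hr hx']
          exact conv_ne_rem _
        simp [h, this]
    rw [List.filter_congr hpred, hF]
    apply List.map_congr_left
    intro x hx
    have h : ¬ ((x : Int), (r : Int)) ∈ mk := by
      have := (List.mem_filter.1 hx).2
      simpa using this
    simp [h]
  have hcount : ∀ r : Nat, r < N → (b2.getD r []).count Cell.rem = K r := by
    intro r hr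
    rw [hb2rowEq r hr, List.count_eq_countP, List.countP_map, hK]
    apply List.countP_congr
    intro x hx
    have hx' : x < M := by simpa using hx
    by_cases h : ((x : Int), (r : Int)) ∈ mk
    · simp [h]
    · have : aCell T r x ≠ Cell.rem := by
        rw [hpt r x hr hx']
        exact conv_ne_rem _
      simp [h, this]
  -- the new A board
  have hdm := deleteMarked_eq T dl
  rw [← hb2] at hdm
  set newT := (deleteMarked T dl).1 with hnewT
  have hnewTeq : newT = (b2.map (fun row => row.filter (· ≠ Cell.rem))).map
      (fun row => padLoop row (PySem.List.pyGetD T 0 []).length) := by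
    rw [hnewT, hdm]
  have hnewTlen : newT.length = N := by
    rw [hnewTeq, List.length_map, List.length_map, hb2len]
  have hnewTrow : ∀ r : Nat, r < N → newT.getD r [] =
      List.replicate (K r) Cell.zero ++ F r := by
    intro r hr
    rw [hnewTeq]
    have hrl : r < ((b2.map (fun row => row.filter (· ≠ Cell.rem))).map
        (fun row => padLoop row (PySem.List.pyGetD T 0 []).length)).length := by
      simp only [List.length_map]
      omega
    rw [List.getD_eq_getElem _ _ hrl, List.getElem_map, List.getElem_map]
    rw [← List.getD_eq_getElem b2 [] (by omega)]
    rw [hfilter r hr, padLoop_spec, hW, hFlen r]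
    have hk := hKle r
    congr 1
    congr 1
    omega
  have hnewTrows : ∀ row ∈ newT, row.length = M := by
    intro row hrow
    obtain ⟨i, hi, rfl⟩ := List.mem_iff_getElem.1 hrow
    rw [← List.getD_eq_getElem newT [] hi]
    rw [hnewTrow i (by omega), List.length_append, List.length_replicate, hFlen]
    have := hKle i
    omega
  -- the new B grid
  set newG := gravity m n G mk with hnewG
  set cols := (PySem.List.pyRange 0 n 1).map
    (fun j =>
      let kept := ((PySem.List.pyRange 0 m 1).filter (fun i => ¬ ((i, j) ∈ mk))).map
        (fun i => cellB G i j)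
      List.replicate (m - (kept.length : Int)).toNat (none : Option Char) ++ kept) with hcols
  have hnewGeq : newG = (PySem.List.pyRange 0 m 1).map
      (fun i => (PySem.List.pyRange 0 n 1).map
        (fun j => PySem.List.pyGetD (PySem.List.pyGetD cols j []) i none)) := rfl
  have hcolsr : ∀ r : Nat, r < N → PySem.List.pyGetD cols (r : Int) [] =
      List.replicate (K r) (none : Option Char) ++ kept r := by
    intro r hr
    rw [PySem.List.pyGetD_natCast, hcols, pyRange_zero_map n, List.map_map]
    rw [getD_map_range _ (by omega)]
    simp only [Function.comp]
    have hk' : ((PySem.List.pyRange 0 m 1).filter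
        (fun i => decide (¬ ((i, (r : Int)) ∈ mk)))).map (fun i => cellB G i (r : Int))
        = kept r := by
      rw [pyRange_zero_map m, List.filter_map, List.map_map, hkept]
      have : ∀ x ∈ List.range M,
          ((fun i => decide (¬ ((i, (r : Int)) ∈ mk))) ∘ (fun (i : Nat) => (i : Int))) x
          = !decide (((x : Int), (r : Int)) ∈ mk) := by
        intro x hx
        simp
      rw [List.filter_congr this]
      apply List.map_congr_left
      intro x hx
      exact cellB_natCast G x r
    rw [hk', hkeptlen r]
    have hk := hKle r
    congr 1
    congr 1
    omega
  have hnewGlen : newG.length = M := by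
    rw [hnewGeq, List.length_map, pyRange_zero_map m, List.length_map, List.length_range]
  have hnewGrowEq : ∀ x : Nat, x < M → newG.getD x [] = (List.range N).map
      (fun (r : Nat) => PySem.List.pyGetD (PySem.List.pyGetD cols (r : Int) []) (x : Int) none) := by
    intro x hx
    rw [hnewGeq, pyRange_zero_map m, List.map_map]
    rw [getD_map_range _ (by omega)]
    simp only [Function.comp]
    rw [pyRange_zero_map n, List.map_map]
    apply List.map_congr_left
    intro r _
    rfl
  have hnewGrows : ∀ row ∈ newG, row.length = N := by
    intro row hrow
    obtain ⟨i, hi, rfl⟩ := List.mem_iff_getElem.1 hrow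
    rw [← List.getD_eq_getElem newG [] hi]
    rw [hnewGrowEq i (by omega), List.length_map, List.length_range]
  have hptnew : ∀ r x : Nat, r < N → x < M → aCell newT r x = conv (bCell newG x r) := by
    intro r x hr hx
    rw [aCell, hnewTrow r hr, bCell, hnewGrowEq x hx, getD_map_range _ (by omega)]
    rw [hcolsr r hr, pyGetD_nonneg_eq _ (by omega)]
    rw [hkeptconv r hr, conv_getD_pad]
    congr 2
  -- the removal count equals the number of marked cells
  have hcnt : (deleteMarked T dl).2 = (mk.length : Int) := by
    rw [hdm]
    dsimp only
    have hb2list : b2 = (List.range N).map (fun r => b2.getD r []) := by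
      rw [← hb2len]
      exact list_eq_map_range b2 []
    rw [hb2list, List.map_map]
    have : ((List.range N).map
        ((fun row => ((row.count Cell.rem : Nat) : Int)) ∘ (fun r => b2.getD r []))).sum
        = ((List.range N).map (fun (r : Nat) => ((K r : Nat) : Int))).sum := by
      congr 1
      apply List.map_congr_left
      intro r hr
      have hr' : r < N := by simpa using hr
      simp only [Function.comp]
      rw [hcount r hr']
    rw [this, listSum_cast (g := K)]
    congr 1
    have hbd : ∀ q ∈ mk, 0 ≤ q.1 ∧ q.1 < (M : Int) ∧ 0 ≤ q.2 ∧ q.2 < (N : Int) := by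
      intro q hq
      have := marks_bounds G q hq
      constructor
      · exact this.1
      refine ⟨by omega, this.2.2.1, by omega⟩
    exact (marks_count mk (nodup_computeMarks m n G) hbd).symm
  exact ⟨⟨hnewTlen, hnewGlen, hnewTrows, hnewGrows, hptnew⟩, hcnt⟩

-- ---- the round loops agree ----

theorem loop_eq {m n : Int} (hm : 0 < m) (hn : 0 < n) :
    ∀ (fuel : Nat) (T : List (List Cell)) (G : List (List (Option Char))) (ans : Int),
      SimRel m n T G → solLoop fuel T ans = altLoop m n fuel G ans := by
  intro fuel
  induction fuel with
  | zero => intros; rfl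
  | succ f ih =>
    intro T G ans hrel
    by_cases hnil : markDelete T = []
    · have hnil' : computeMarks m n G = [] := (dl_nil_iff hrel).1 hnil
      simp [solLoop, altLoop, hnil, hnil']
    · have hnil' : computeMarks m n G ≠ [] := fun h => hnil ((dl_nil_iff hrel).2 h)
      obtain ⟨hrel2, hcnt⟩ := step_sim hm hn hrel
      simp only [solLoop, altLoop, if_neg hnil, if_neg hnil']
      rw [hcnt]
      exact ih _ _ _ hrel2

-- ---- the initial boards are related ----

theorem inner_append_fold (g : Nat → Cell) (W : Nat) :
    ∀ (nb : List (List Cell)), W ≤ nb.length →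
      ((List.range W).foldl (fun nb (w : Nat) => nb.set w (nb.getD w [] ++ [g w])) nb).length
        = nb.length ∧
      ∀ i : Nat, i < nb.length →
        ((List.range W).foldl (fun nb (w : Nat) => nb.set w (nb.getD w [] ++ [g w])) nb).getD i []
          = if i < W then nb.getD i [] ++ [g i] else nb.getD i [] := by
  induction W with
  | zero =>
    intro nb _
    refine ⟨rfl, ?_⟩
    intro i _
    simp
  | succ W ihW =>
    intro nb hW
    obtain ⟨ihlen, ihget⟩ := ihW nb (by omega)
    rw [List.range_succ, List.foldl_append]
    simp only [List.foldl_cons, List.foldl_nil]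
    constructor
    · rw [List.length_set, ihlen]
    · intro i hi
      by_cases hiW : i = W
      · subst hiW
        have hlt : i < ((List.range i).foldl
            (fun nb (w : Nat) => nb.set w (nb.getD w [] ++ [g w])) nb).length := by
          rw [ihlen]; omega
        rw [List.getD_eq_getElem _ _ (by rw [List.length_set]; exact hlt),
            List.getElem_set_self, ihget i hi]
        simp
      · have hlt : i < ((List.range W).foldl
            (fun nb (w : Nat) => nb.set w (nb.getD w [] ++ [g w])) nb).length := by
          rw [ihlen]; omega
        rw [List.getD_eq_getElem _ _ (by rw [List.length_set]; exact hlt),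
            List.getElem_set_ne (fun h => hiW h.symm),
            ← List.getD_eq_getElem _ [] hlt, ihget i hi]
        split_ifs <;> first | rfl | omega

theorem initializeBoard_facts (m n : Int) (board : List String) :
    (initializeBoard m n board).length = n.toNat ∧
    ∀ w : Nat, w < n.toNat → (initializeBoard m n board).getD w []
        = (List.range m.toNat).map (fun (x : Nat) => charAt board (x : Int) (w : Int)) := by
  unfold initializeBoard
  rw [pyRange_zero_map m, List.foldl_map]
  have hstep : ∀ (nb : List (List Cell)) (x : Nat), nb.length = n.toNat →
      ((PySem.List.pyRange 0 n 1).foldl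
        (fun nb w => PySem.List.pySetD nb w (PySem.List.pyGetD nb w [] ++ [charAt board (x : Int) w])) nb).length
        = nb.length ∧
      ∀ i : Nat, i < nb.length →
        ((PySem.List.pyRange 0 n 1).foldl
          (fun nb w => PySem.List.pySetD nb w (PySem.List.pyGetD nb w [] ++ [charAt board (x : Int) w])) nb).getD i []
          = nb.getD i [] ++ [charAt board (x : Int) (i : Int)] := by
    intro nb x hnb
    rw [pyRange_zero_map n, List.foldl_map]
    have hfun : (List.range n.toNat).foldl
        (fun nb (w : Nat) => PySem.List.pySetD nb (w : Int)
          (PySem.List.pyGetD nb (w : Int) [] ++ [charAt board (x : Int) (w : Int)])) nb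
        = (List.range n.toNat).foldl
          (fun nb (w : Nat) => nb.set w (nb.getD w [] ++ [charAt board (x : Int) (w : Int)])) nb := by
      apply PySem.List.foldl_congr_mem
      intro nb' w _
      rw [PySem.List.pySetD_natCast, PySem.List.pyGetD_natCast]
    rw [hfun]
    obtain ⟨hlen, hget⟩ := inner_append_fold (fun w => charAt board (x : Int) (w : Int))
      n.toNat nb (by omega)
    refine ⟨hlen, ?_⟩
    intro i hi
    rw [hget i hi, if_pos (by omega)]
  have houter : ∀ (H : Nat) (nb : List (List Cell)), nb.length = n.toNat →
      ((List.range H).foldl (fun nb (x : Nat) =>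
        (PySem.List.pyRange 0 n 1).foldl
          (fun nb w => PySem.List.pySetD nb w (PySem.List.pyGetD nb w [] ++ [charAt board (x : Int) w])) nb) nb).length
        = nb.length ∧
      ∀ w : Nat, w < nb.length →
        ((List.range H).foldl (fun nb (x : Nat) =>
          (PySem.List.pyRange 0 n 1).foldl
            (fun nb w => PySem.List.pySetD nb w (PySem.List.pyGetD nb w [] ++ [charAt board (x : Int) w])) nb) nb).getD w []
          = nb.getD w [] ++ (List.range H).map (fun (x : Nat) => charAt board (x : Int) (w : Int)) := by
    intro H
    induction H with
    | zero =>
      intro nb hnb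
      refine ⟨rfl, ?_⟩
      intro w _
      simp
    | succ H ihH =>
      intro nb hnb
      obtain ⟨ihlen, ihget⟩ := ihH nb hnb
      rw [List.range_succ, List.foldl_append]
      simp only [List.foldl_cons, List.foldl_nil]
      obtain ⟨slen, sget⟩ := hstep ((List.range H).foldl (fun nb (x : Nat) =>
        (PySem.List.pyRange 0 n 1).foldl
          (fun nb w => PySem.List.pySetD nb w (PySem.List.pyGetD nb w [] ++ [charAt board (x : Int) w])) nb) nb)
        H (by rw [ihlen, hnb])
      constructor
      · rw [slen, ihlen]
      · intro w hw
        rw [sget w (by rw [ihlen]; exact hw), ihget w hw]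
        simp [List.map_append, List.append_assoc]
  have hinit : ((PySem.List.pyRange 0 n 1).map (fun _ => ([] : List Cell))).length = n.toNat := by
    rw [List.length_map, pyRange_zero_map n, List.length_map, List.length_range]
  obtain ⟨olen, oget⟩ := houter m.toNat ((PySem.List.pyRange 0 n 1).map (fun _ => ([] : List Cell))) hinit
  constructor
  · rw [olen, hinit]
  · intro w hw
    rw [oget w (by omega)]
    have : ((PySem.List.pyRange 0 n 1).map (fun _ => ([] : List Cell))).getD w [] = [] := by
      rw [pyRange_zero_map n, List.map_map]
      exact getD_map_range _ (by omega) []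
    rw [this]
    rfl

theorem charAt_eq (board : List String) (x r : Nat) (hx : x < board.length)
    (hr : r < board[x].toList.length) :
    charAt board (x : Int) (r : Int) = Cell.tile board[x].toList[r] := by
  unfold charAt
  rw [PySem.List.pyGet?_natCast, List.getElem?_eq_getElem hx]
  simp only []
  rw [PySem.Str.pyGet?_natCast, List.getElem?_eq_getElem hr]

theorem mem_take_of_lt {board : List String} {M x : Nat} (hx : x < M) (hxb : x < board.length) :
    board[x] ∈ board.take M := by
  have h : x < (board.take M).length := by
    rw [List.length_take]; omega
  have : (board.take M)[x] = board[x] := List.getElem_take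
  rw [← this]
  exact List.getElem_mem h

theorem init_rel {m n : Int} {board : List String} (hm : 0 < m) (hn : 0 < n)
    (hmb : m ≤ (board.length : Int))
    (hrows : ∀ s ∈ board.take m.toNat, n ≤ (s.length : Int)) :
    SimRel m n (initializeBoard m n board) (initGrid m n board) := by
  obtain ⟨hlen, hget⟩ := initializeBoard_facts m n board
  have hMb : m.toNat ≤ board.length := by omega
  have hGeq : initGrid m n board
      = (board.take m.toNat).map (fun row => (row.toList.take n.toNat).map some) := by
    unfold initGrid
    rw [PySem.List.slice_to _ (le_of_lt hm)]
    apply List.map_congr_left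
    intro row _
    rw [PySem.List.slice_to _ (le_of_lt hn)]
  have hrowlen : ∀ x : Nat, x < m.toNat → (hxb : x < board.length) →
      n.toNat ≤ board[x].toList.length := by
    intro x hx hxb
    have := hrows _ (mem_take_of_lt hx hxb)
    have hL : board[x].toList.length = board[x].length := String.length_toList
    omega
  refine ⟨hlen, ?_, ?_, ?_, ?_⟩
  · rw [hGeq, List.length_map, List.length_take]
    omega
  · intro row hrow
    obtain ⟨w, hw, rfl⟩ := List.mem_iff_getElem.1 hrow
    rw [← List.getD_eq_getElem _ [] hw]
    rw [hget w (by omega), List.length_map, List.length_range]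
  · intro row hrow
    rw [hGeq] at hrow
    obtain ⟨x, hx, rfl⟩ := List.mem_iff_getElem.1 hrow
    have hx' : x < m.toNat := by
      rw [List.length_map, List.length_take] at hx
      omega
    have hxb : x < board.length := by omega
    simp only [List.getElem_map, List.getElem_take, List.length_map, List.length_take]
    have := hrowlen x hx' hxb
    omega
  · intro r x hr hx
    have hxb : x < board.length := by omega
    have hrl : r < board[x].toList.length := by
      have := hrowlen x hx hxb
      omega
    -- A side
    rw [aCell, hget r hr, getD_map_range _ hx, charAt_eq board x r hxb hrl]
    -- B side
    rw [bCell, hGeq]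
    have hxg : x < ((board.take m.toNat).map
        (fun row => (row.toList.take n.toNat).map some)).length := by
      rw [List.length_map, List.length_take]
      omega
    rw [List.getD_eq_getElem _ [] hxg]
    simp only [List.getElem_map, List.getElem_take]
    have hrg : r < ((board[x].toList.take n.toNat).map some).length := by
      rw [List.length_map, List.length_take]
      omega
    rw [List.getD_eq_getElem _ none hrg]
    simp only [List.getElem_map, List.getElem_take]
    rfl

-- ---- degenerate sizes: both programs mark nothing and return 0 ----

theorem markDelete_nil_degenerate (m n : Int) (board : List String) (h : m ≤ 0 ∨ n ≤ 0) :
    markDelete (initializeBoard m n board) = [] := by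
  obtain ⟨hlen, hget⟩ := initializeBoard_facts m n board
  rw [List.eq_nil_iff_forall_not_mem]
  rintro ⟨r, c⟩ hmem
  obtain ⟨h1, h2, h3, h4, _⟩ := (mem_markDelete _ r c).1 hmem
  rw [hlen] at h2
  have hN : 0 < n.toNat := by omega
  have hwidth : (PySem.List.pyGetD (initializeBoard m n board) 0 []).length = m.toNat := by
    rw [pyGetD_nonneg_eq _ (le_refl 0)]
    simp only [Int.toNat_zero]
    rw [hget 0 (by omega)]
    simp
  rw [hwidth] at h4
  omega

theorem computeMarks_nil_degenerate (m n : Int) (G : List (List (Option Char)))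
    (h : m ≤ 0 ∨ n ≤ 0) : computeMarks m n G = [] := by
  rw [List.eq_nil_iff_forall_not_mem]
  intro q hq
  obtain ⟨i, j, hi0, hi1, hj0, hj1, _, _⟩ := (mem_computeMarks m n G q).1 hq
  omega

-- ===== VERDICT (by name: the statement is the Claim_ definition above) =====
theorem solution_spec : Claim_equal_solution := by
  unfold Claim_equal_solution
  intro m n board _hdom hpre
  unfold Spec_solution
  by_cases hdeg : m ≤ 0 ∨ n ≤ 0
  · have hA : solution m n board = 0 := by
      unfold solution
      simp [solLoop, markDelete_nil_degenerate m n board hdeg]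
    have hB : solution_alt m n board = 0 := by
      unfold solution_alt
      simp [altLoop, computeMarks_nil_degenerate m n (initGrid m n board) hdeg]
    rw [hA, hB]
  · rw [not_or, not_le, not_le] at hdeg
    obtain ⟨hm, hn⟩ := hdeg
    obtain ⟨hmb, hrows⟩ := hpre hn
    unfold solution solution_alt
    exact loop_eq hm hn _ _ _ 0 (init_rel hm hn hmb hrows)
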